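-- pv_equiv track=rewrite | github.com/WeiqiNs/CubeCrypto | src/encbit/face.py | get_frame_column
-- ===== SOURCE A (Python) =====
-- import math
-- from collections import deque
--
-- def get_frame_column(cube_side_length: int) -> list:
--     """Get column names for the cube face data frame.
--
--     :param cube_side_length: The desired side length of the cube.
--     :return: A list object with the column names.
--     """
--     # If the side length is even, start with an empty queue.
--     if cube_side_length % 2 == 0:
--         column_queue = deque()
--         # Pad R on the right side and L on the left side.
--         for move_index in range(1, int(cube_side_length / 2) + 1):
--             column_queue.appendleft(f"L{move_index}")
--             column_queue.append(f"R{move_index}")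
--
--     # If side length is odd, start the queue with a "C" at the center.
--     else:
--         column_queue = deque("C")
--         # Pad R on the right side and L on the left side.
--         for move_index in range(1, int(math.ceil(cube_side_length / 2))):
--             column_queue.appendleft(f"L{move_index}")
--             column_queue.append(f"R{move_index}")
--
--     return list(column_queue)
-- ===== SOURCE B (Python) =====
-- def get_frame_column(cube_side_length: int) -> list:
--     """Get column names for the cube face data frame."""
--     k = cube_side_length // 2
--     left = [f"L{i}" for i in range(k, 0, -1)]
--     center = [] if cube_side_length % 2 == 0 else ["C"]
--     right = [f"R{i}" for i in range(1, k + 1)]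
--     return left + center + right
-- ===== Notes on version B (the rewrite author's own statement) =====
-- stated objective: simpler
-- what changed: Replaces the center-out deque loop (appendleft/append per iteration) by three independent blocks built directly by comprehensions and concatenated: left labels counted down, optional center, right labels counted up.
import Mathlib
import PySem

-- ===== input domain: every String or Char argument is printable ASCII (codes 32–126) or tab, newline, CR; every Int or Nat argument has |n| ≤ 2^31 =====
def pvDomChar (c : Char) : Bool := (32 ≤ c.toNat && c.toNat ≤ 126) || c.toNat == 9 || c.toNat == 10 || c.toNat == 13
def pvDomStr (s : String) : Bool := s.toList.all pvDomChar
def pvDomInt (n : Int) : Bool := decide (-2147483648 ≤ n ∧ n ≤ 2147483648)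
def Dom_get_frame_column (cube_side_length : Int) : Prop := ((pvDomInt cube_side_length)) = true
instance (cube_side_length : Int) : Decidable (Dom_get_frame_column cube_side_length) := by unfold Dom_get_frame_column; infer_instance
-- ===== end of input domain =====

-- B replaces A's center-out deque loop by three independent blocks (left labels,
-- optional center, right labels) built by comprehensions and concatenated; objective: simpler.

-- ===== PORT A =====
-- Python A: center-out deque loop; int(n/2) truncates toward zero (Int.tdiv),
-- math.ceil(n/2) = -((-n) // 2) (ceiling division), both exact on Dom.
def get_frame_column (cube_side_length : Int) : List String :=
  if PySem.Int.mod cube_side_length 2 == 0 then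
    (PySem.List.pyRange 1 (cube_side_length.tdiv 2 + 1) 1).foldl
      (fun q i => ("L" ++ PySem.Int.toStr i) :: q ++ ["R" ++ PySem.Int.toStr i]) []
  else
    (PySem.List.pyRange 1 (-(PySem.Int.floordiv (-cube_side_length) 2)) 1).foldl
      (fun q i => ("L" ++ PySem.Int.toStr i) :: q ++ ["R" ++ PySem.Int.toStr i]) ["C"]

-- ===== PORT B =====
def get_frame_column_alt (cube_side_length : Int) : List String :=
  let k := PySem.Int.floordiv cube_side_length 2
  let left := (PySem.List.pyRange k 0 (-1)).map (fun i => "L" ++ PySem.Int.toStr i)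
  let center := if PySem.Int.mod cube_side_length 2 == 0 then [] else ["C"]
  let right := (PySem.List.pyRange 1 (k + 1) 1).map (fun i => "R" ++ PySem.Int.toStr i)
  left ++ center ++ right

-- ===== PRECONDITION & SPEC =====
def Spec_get_frame_column (cube_side_length : Int) (out : List String) : Prop := out = get_frame_column_alt cube_side_length
instance (cube_side_length : Int) (out : List String) : Decidable (Spec_get_frame_column cube_side_length out) := by unfold Spec_get_frame_column; infer_instance

-- ===== CLAIM (what is proved, stated in full; the proofs are below) =====
def Claim_equal_get_frame_column : Prop := ∀ (cube_side_length : Int), Dom_get_frame_column cube_side_length → Spec_get_frame_column cube_side_length (get_frame_column cube_side_length)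

-- ===== LEMMAS AND PROOFS =====

-- The center-out fold over any list equals: reversed L-labels ++ seed ++ R-labels.
theorem pv_fold_center_out (l : List Int) (c : List String) :
    l.foldl (fun q i => ("L" ++ PySem.Int.toStr i) :: q ++ ["R" ++ PySem.Int.toStr i]) c
      = l.reverse.map (fun i => "L" ++ PySem.Int.toStr i) ++ c
          ++ l.map (fun i => "R" ++ PySem.Int.toStr i) := by
  induction l generalizing c with
  | nil => simp
  | cons i l ih => rw [List.foldl_cons, ih]; simp

-- ===== VERDICT (by name: the statement is the Claim_ definition above) =====
theorem get_frame_column_spec : Claim_equal_get_frame_column := by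
  intro n _
  unfold Spec_get_frame_column get_frame_column get_frame_column_alt
  rw [pv_fold_center_out, pv_fold_center_out]
  simp only [PySem.List.pyRange_neg_one_eq_reverse,
    PySem.Int.mod_eq_emod_of_pos (by norm_num : (0:Int) < 2),
    PySem.Int.floordiv_eq_ediv_of_pos (by norm_num : (0:Int) < 2)]
  by_cases h : n % 2 = 0
  · have ht : n.tdiv 2 = n / 2 := Int.tdiv_eq_ediv_of_dvd (Int.dvd_of_emod_eq_zero h)
    simp [h, ht]
  · have hc : -(-n / 2) = n / 2 + 1 := by omega
    simp [h, hc]
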